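-- pv_equiv track=rewrite | github.com/MorningStar0709/ppt-master-enhanced | skills/ppt-master/scripts/revision_utils.py | _normalize_allowed_changes
-- ===== SOURCE A (Python) =====
-- ALLOWED_CHANGE_TYPES = ("layout", "copy", "visual", "structure", "assets")
--
-- def _normalize_allowed_changes(value: object) -> list[str]:
--     """Normalize change-type labels into a stable sorted list."""
--     if isinstance(value, str):
--         candidates = [part.strip().lower() for part in value.split(",")]
--     elif isinstance(value, list):
--         candidates = [str(part).strip().lower() for part in value]
--     else:
--         candidates = []
--
--     normalized = sorted(
--         {
--             item
--             for item in candidates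
--             if item in ALLOWED_CHANGE_TYPES
--         }
--     )
--     return normalized
-- ===== SOURCE B (Python) =====
-- def _normalize_allowed_changes(value: object) -> list[str]:
--     """Normalize change-type labels into a stable sorted list."""
--     if isinstance(value, str):
--         parts = value.split(",")
--     elif isinstance(value, list):
--         parts = [str(p) for p in value]
--     else:
--         parts = []
--     assets = copy = layout = structure = visual = False
--     for raw in parts:
--         p = raw.strip().lower()
--         if p == "assets":
--             assets = True
--         elif p == "copy":
--             copy = True
--         elif p == "layout":
--             layout = True
--         elif p == "structure":
--             structure = True
--         elif p == "visual":
--             visual = True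
--     out = []
--     if assets:
--         out.append("assets")
--     if copy:
--         out.append("copy")
--     if layout:
--         out.append("layout")
--     if structure:
--         out.append("structure")
--     if visual:
--         out.append("visual")
--     return out
-- ===== Notes on version B (the rewrite author's own statement) =====
-- stated objective: alternative
-- what changed: B makes a single pass over the comma-split parts maintaining five boolean flags (one per allowed label, if/elif chain) and then emits the flagged labels in fixed alphabetical order, instead of filtering candidates into a set and sorting it.
import Mathlib
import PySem

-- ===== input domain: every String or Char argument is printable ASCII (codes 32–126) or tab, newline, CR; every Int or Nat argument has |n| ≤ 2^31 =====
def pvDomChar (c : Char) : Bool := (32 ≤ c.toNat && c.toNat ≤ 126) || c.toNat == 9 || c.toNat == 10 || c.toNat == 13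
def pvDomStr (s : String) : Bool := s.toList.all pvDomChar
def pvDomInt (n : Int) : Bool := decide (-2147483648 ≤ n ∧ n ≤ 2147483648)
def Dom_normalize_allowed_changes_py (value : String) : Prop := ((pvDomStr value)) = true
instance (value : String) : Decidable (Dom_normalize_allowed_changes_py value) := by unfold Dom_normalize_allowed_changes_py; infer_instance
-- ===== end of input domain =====

-- B makes a single pass over the comma-split parts with five boolean flags (if/elif chain) and emits
-- the flagged labels in fixed alphabetical order, instead of filter + set + sort (objective: alternative).
-- The Lean signature takes a String, so only A's 'isinstance(value, str)' branch is in scope.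

-- ===== PORT A =====
def pvAllowedA : List String := ["layout", "copy", "visual", "structure", "assets"]

-- value.split(","): the separator "," is nonempty, so PySem.Str.split? is always 'some'; '.getD []' only discharges the Option.
def normalize_allowed_changes_py (value : String) : List String :=
  let candidates := ((PySem.Str.split? value ",").getD []).map
    (fun part => PySem.Str.lower (PySem.Str.strip part))
  PySem.List.sorted
    (PySem.Set.ofList (candidates.filter (fun item => pvAllowedA.contains item)))
    (fun x => x) false

-- ===== PORT B =====
-- one step of B's loop: normalize one raw part and set at most one of the five flags (the if/elif chain)
def pvFlagStep (st : Bool × Bool × Bool × Bool × Bool) (raw : String) :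
    Bool × Bool × Bool × Bool × Bool :=
  let p := PySem.Str.lower (PySem.Str.strip raw)
  if p == "assets" then (true, st.2.1, st.2.2.1, st.2.2.2.1, st.2.2.2.2)
  else if p == "copy" then (st.1, true, st.2.2.1, st.2.2.2.1, st.2.2.2.2)
  else if p == "layout" then (st.1, st.2.1, true, st.2.2.2.1, st.2.2.2.2)
  else if p == "structure" then (st.1, st.2.1, st.2.2.1, true, st.2.2.2.2)
  else if p == "visual" then (st.1, st.2.1, st.2.2.1, st.2.2.2.1, true)
  else st

def normalize_allowed_changes_py_alt (value : String) : List String :=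
  let parts := (PySem.Str.split? value ",").getD []
  let st := parts.foldl pvFlagStep (false, false, false, false, false)
  (if st.1 then ["assets"] else []) ++
  (if st.2.1 then ["copy"] else []) ++
  (if st.2.2.1 then ["layout"] else []) ++
  (if st.2.2.2.1 then ["structure"] else []) ++
  (if st.2.2.2.2 then ["visual"] else [])

-- ===== PRECONDITION & SPEC =====
def Spec_normalize_allowed_changes_py (value : String) (out : List String) : Prop := out = normalize_allowed_changes_py_alt value
instance (value : String) (out : List String) : Decidable (Spec_normalize_allowed_changes_py value out) := by unfold Spec_normalize_allowed_changes_py; infer_instance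

-- ===== CLAIM (what is proved, stated in full; the proofs are below) =====
def Claim_equal_normalize_allowed_changes_py : Prop := ∀ (value : String), Dom_normalize_allowed_changes_py value → Spec_normalize_allowed_changes_py value (normalize_allowed_changes_py value)

-- ===== LEMMAS AND PROOFS =====

-- abbreviation used only in proofs: the normalization applied to each part
def pvNorm (raw : String) : String := PySem.Str.lower (PySem.Str.strip raw)

-- B's fold computes, in each component, "some part normalizes to this label".
theorem pv_fold_spec (parts : List String) (a c l s v : Bool) :
    parts.foldl pvFlagStep (a, c, l, s, v) =
      (a || parts.any (fun r => pvNorm r == "assets"),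
       c || parts.any (fun r => pvNorm r == "copy"),
       l || parts.any (fun r => pvNorm r == "layout"),
       s || parts.any (fun r => pvNorm r == "structure"),
       v || parts.any (fun r => pvNorm r == "visual")) := by
  induction parts generalizing a c l s v with
  | nil => simp
  | cons r t ih =>
    simp only [List.foldl_cons, List.any_cons]
    have hstep : pvFlagStep (a, c, l, s, v) r =
        (a || (pvNorm r == "assets"), c || (pvNorm r == "copy"),
         l || (pvNorm r == "layout"), s || (pvNorm r == "structure"),
         v || (pvNorm r == "visual")) := by
      simp only [pvFlagStep, pvNorm]
      split_ifs with h1 h2 h3 h4 h5 <;> simp_all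
    rw [hstep, ih]
    simp [Bool.or_assoc]

-- The five allowed labels in alphabetical order are strictly increasing.
theorem pv_sortedUniverse_pairwise :
    (["assets", "copy", "layout", "structure", "visual"] : List String).Pairwise (· < ·) := by
  refine List.Pairwise.cons ?_ (List.Pairwise.cons ?_ (List.Pairwise.cons ?_
    (List.Pairwise.cons ?_ (List.pairwise_singleton ..)))) <;>
    (intro b hb; fin_cases hb <;> (rw [String.lt_iff_toList_lt]; decide))

-- A's sorted(set(filter(c))) is exactly the flagged-label concatenation over membership in c.
theorem pv_key (c : List String) :
    PySem.List.sorted (PySem.Set.ofList (c.filter (fun item => pvAllowedA.contains item)))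
      (fun x => x) false
    = (if c.any (· == "assets") then ["assets"] else []) ++
      (if c.any (· == "copy") then ["copy"] else []) ++
      (if c.any (· == "layout") then ["layout"] else []) ++
      (if c.any (· == "structure") then ["structure"] else []) ++
      (if c.any (· == "visual") then ["visual"] else []) := by
  have hform : (if c.any (· == "assets") then ["assets"] else []) ++
      (if c.any (· == "copy") then ["copy"] else []) ++
      (if c.any (· == "layout") then ["layout"] else []) ++
      (if c.any (· == "structure") then ["structure"] else []) ++
      (if c.any (· == "visual") then ["visual"] else [])
      = (["assets", "copy", "layout", "structure", "visual"] : List String).filter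
          (fun label => c.any (· == label)) := by
    cases h1 : c.any (· == "assets") <;> cases h2 : c.any (· == "copy") <;>
      cases h3 : c.any (· == "layout") <;> cases h4 : c.any (· == "structure") <;>
      cases h5 : c.any (· == "visual") <;> simp [List.filter, h1, h2, h3, h4, h5]
  rw [hform]
  apply PySem.List.sorted_eq_of_perm_of_pairwise_lt
  · rw [List.perm_ext_iff_of_nodup
      ((by decide : (["assets", "copy", "layout", "structure", "visual"] : List String).Nodup).filter _)
      (PySem.Set.nodup_ofList _)]
    intro x
    simp only [List.mem_filter, PySem.Set.mem_ofList, List.any_eq_true, beq_iff_eq,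
      List.contains_iff_mem, pvAllowedA, List.mem_cons, List.not_mem_nil, or_false]
    constructor
    · rintro ⟨hx, y, hy, rfl⟩; exact ⟨hy, by tauto⟩
    · rintro ⟨hx, hall⟩; exact ⟨by tauto, x, hx, rfl⟩
  · exact pv_sortedUniverse_pairwise.sublist (List.filter_sublist ..)

-- ===== VERDICT (by name: the statement is the Claim_ definition above) =====
theorem normalize_allowed_changes_py_spec : Claim_equal_normalize_allowed_changes_py := by
  intro value _
  show normalize_allowed_changes_py value = normalize_allowed_changes_py_alt value
  simp only [normalize_allowed_changes_py, normalize_allowed_changes_py_alt, pv_fold_spec,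
    Bool.false_or]
  rw [show (fun part => PySem.Str.lower (PySem.Str.strip part)) = pvNorm from rfl, pv_key]
  simp
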